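-- pv_equiv track=rewrite | github.com/JamesLTaylor/MyComputer | compiler.py | expand_macros
-- ===== SOURCE A (Python) =====
-- from collections import defaultdict
--
-- def expand_macros(program):
--     """
--     Global search for all macros and replace them
--     """
--     macros = defaultdict(list)
--     removed = []
--     i = 0
--     while i < len(program):
--         full_line = program[i]
--         if full_line.startswith('DEFINE'):
--             is_open = True
--             name = None
--             while is_open:
--                 full_line = program[i]
--                 if '{' in full_line:
--                     name = full_line.split()[1]
--                     full_line = full_line.split('{')[1]
--                 elif '}' in full_line:
--                     full_line = full_line.split('}')[0]
--                     is_open = False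
--                 if name is None:
--                     raise Exception('Macro does not appear to have a name')
--                 if len(full_line.strip()) > 0:
--                     macros[name].append(full_line)
--                 i += 1
--         else:
--             removed.append(full_line)
--             i += 1
--     expanded = []
--     for full_line in removed:
--         is_macro = False
--         for macro, lines in macros.items():
--             if macro in full_line.split():
--                 expanded += lines
--                 is_macro = True
--         if not is_macro:
--             expanded.append(full_line)
--     return expanded
-- ===== SOURCE B (Python) =====
-- def expand_macros(program):
--     """
--     Global search for all macros and replace them
--     (single pass with an inside-block flag; replacement resolves each line's
--     tokens through a name->position dict instead of scanning every macro)
--     """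
--     macros = {}
--     plain = []
--     inside = False
--     name = ''
--     for line in program:
--         if inside or line.startswith('DEFINE'):
--             if '{' in line:
--                 name = line.split()[1]
--                 seg = line.split('{')[1]
--                 inside = True
--             elif '}' in line:
--                 seg = line.split('}')[0]
--                 inside = False
--             else:
--                 seg = line
--             if seg.strip():
--                 macros.setdefault(name, []).append(seg)
--         else:
--             plain.append(line)
--     order = {name: j for j, name in enumerate(macros)}
--     bodies = list(macros.values())
--     out = []
--     for line in plain:
--         slots = sorted({order[t] for t in line.split() if t in order})
--         if slots:
--             for s in slots:
--                 out += bodies[s]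
--         else:
--             out.append(line)
--     return out
-- ===== Notes on version B (the rewrite author's own statement) =====
-- stated objective: alternative
-- what changed: B parses in one pass with an inside-block flag instead of A's nested index-driven while loops, and replaces A's per-line rescan of every macro (re-splitting the line for each macro) by splitting each line once and resolving its tokens through a name-to-position dict, emitting matched macro bodies in sorted insertion-position order.
import Mathlib
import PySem

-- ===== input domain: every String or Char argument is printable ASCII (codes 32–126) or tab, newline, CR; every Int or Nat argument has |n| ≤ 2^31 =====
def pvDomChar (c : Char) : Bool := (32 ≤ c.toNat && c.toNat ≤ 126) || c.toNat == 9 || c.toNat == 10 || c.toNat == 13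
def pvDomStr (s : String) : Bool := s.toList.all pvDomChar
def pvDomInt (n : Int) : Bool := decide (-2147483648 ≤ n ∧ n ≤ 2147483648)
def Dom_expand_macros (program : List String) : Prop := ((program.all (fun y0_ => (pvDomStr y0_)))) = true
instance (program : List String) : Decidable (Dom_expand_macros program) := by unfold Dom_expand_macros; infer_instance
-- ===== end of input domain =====

-- B parses in one pass and resolves each line's tokens through a name→position dict instead
-- of A's per-line scan over every macro (objective: alternative; A's raises are excluded by Pre_).

-- ===== PORT A =====
abbrev PVMacros := PySem.Dict String (List String)

-- A: `if len(full_line.strip()) > 0: macros[name].append(full_line)` on a defaultdict(list)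
def pvAppendA (macros : PVMacros) (name fl : String) : PVMacros :=
  if 0 < PySem.Str.len (PySem.Str.strip fl) then macros.modify name [] (· ++ [fl]) else macros

-- one iteration of A's inner `while is_open:` loop on program[i]; `none` = the Python raises.
-- result: (name, is_open, macros) after the iteration.
def pvInnerA (line : String) (name : Option String) (macros : PVMacros) :
    Option (Option String × Bool × PVMacros) :=
  if PySem.Str.isIn "{" line then
    match (PySem.Str.split₀ line)[1]? with
    | none => none      -- full_line.split()[1] raises IndexError
    | some nm =>
      -- full_line = full_line.split('{')[1]; '{' ∈ line, so index 1 exists ('' default unreachable)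
      let fl := ((PySem.Str.split? line "{").getD []).getD 1 ""
      some (some nm, true, pvAppendA macros nm fl)
  else if PySem.Str.isIn "}" line then
    let fl := ((PySem.Str.split? line "}").getD []).getD 0 ""   -- full_line.split('}')[0]
    match name with
    | none => none      -- raise Exception('Macro does not appear to have a name')
    | some nm => some (name, false, pvAppendA macros nm fl)
  else
    match name with
    | none => none      -- raise Exception('Macro does not appear to have a name')
    | some nm => some (name, true, pvAppendA macros nm line)

-- A's outer `while i < len(program):` walk; mode `some name` is A inside the inner loop
-- (is_open) carrying `name`; the sequential index i becomes structural list recursion.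
def pvParseA : List String → Option (Option String) → PVMacros → List String →
    Option (PVMacros × List String)
  | [], mode, macros, removed =>
    -- inside the inner loop at i = len(program): program[i] raises IndexError
    if mode.isSome then none else some (macros, removed)
  | line :: rest, some name, macros, removed =>
    match pvInnerA line name macros with
    | none => none
    | some (n', isOpen, m') => pvParseA rest (if isOpen then some n' else none) m' removed
  | line :: rest, none, macros, removed =>
    if PySem.Str.startswith line "DEFINE" then
      match pvInnerA line none macros with   -- the first inner iteration re-reads program[i]
      | none => none
      | some (n', isOpen, m') => pvParseA rest (if isOpen then some n' else none) m' removed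
    else pvParseA rest none macros (removed ++ [line])

-- A's replacement loop: for each removed line scan every macro, re-splitting the line each time
def pvReplaceA (macros : PVMacros) (removed : List String) : List String :=
  removed.foldl (fun expanded fl =>
    let r := macros.items.foldl
      (fun (acc : List String × Bool) kv =>
        if (PySem.Str.split₀ fl).contains kv.1 then (acc.1 ++ kv.2, true) else acc)
      (expanded, false)
    if r.2 then r.1 else r.1 ++ [fl]) []

def expand_macros (program : List String) : List String :=
  match pvParseA program none PySem.Dict.empty [] with
  | none => []        -- the Python raises here; Pre_expand_macros excludes these inputs
  | some (macros, removed) => pvReplaceA macros removed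

-- ===== PORT B =====
-- one step of Source B's single-pass loop; state = (inside, name, macros, plain)
def pvStepB (st : Bool × String × PVMacros × List String) (line : String) :
    Bool × String × PVMacros × List String :=
  let (inside, name, macros, plain) := st
  if inside || PySem.Str.startswith line "DEFINE" then
    let (name', seg, inside') :=
      if PySem.Str.isIn "{" line then
        -- name = line.split()[1] (Source B raises when absent — only outside Pre_; '' default unreachable there)
        ((PySem.Str.split₀ line).getD 1 "",
         ((PySem.Str.split? line "{").getD []).getD 1 "", true)
      else if PySem.Str.isIn "}" line then
        (name, ((PySem.Str.split? line "}").getD []).getD 0 "", false)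
      else (name, line, inside)
    if PySem.Str.strip seg ≠ "" then        -- if seg.strip():
      (inside', name', macros.modify name' [] (· ++ [seg]), plain)   -- setdefault(name,[]).append(seg)
    else (inside', name', macros, plain)
  else (inside, name, macros, plain ++ [line])

-- Source B's replacement: order = {name: j}, bodies = values; per line one token set, sorted slots
def pvExpandB (macros : PVMacros) (plain : List String) : List String :=
  let order : PySem.Dict String Int :=
    (PySem.List.enumerate macros.keys).foldl (fun d p => d.insert p.2 p.1) PySem.Dict.empty
  let bodies := macros.values
  plain.foldl (fun out line =>
    let slots := PySem.List.sorted
      (PySem.Set.ofList ((PySem.Str.split₀ line).filterMap (fun t => order.get? t))) id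
    if slots ≠ [] then
      slots.foldl (fun acc s => acc ++ PySem.List.pyGetD bodies s []) out
    else out ++ [line]) []

def expand_macros_alt (program : List String) : List String :=
  let st := program.foldl pvStepB (false, "", PySem.Dict.empty, [])
  pvExpandB st.2.2.1 st.2.2.2

-- ===== PRECONDITION & SPEC =====
-- two-state shape scan of the macro-block grammar A accepts (flag = inside a DEFINE block)
def pvWF : List String → Bool → Bool
  | [], inside => !inside
  | line :: rest, false =>
    if PySem.Str.startswith line "DEFINE" then
      PySem.Str.isIn "{" line && decide (2 ≤ (PySem.Str.split₀ line).length) && pvWF rest true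
    else pvWF rest false
  | line :: rest, true =>
    if PySem.Str.isIn "{" line then
      decide (2 ≤ (PySem.Str.split₀ line).length) && pvWF rest true
    else if PySem.Str.isIn "}" line then pvWF rest false
    else pvWF rest true

-- Pre_ excludes exactly the inputs on which A raises: a DEFINE line (outside a block) whose
-- own text lacks '{' or a second whitespace token, a '{'-line inside a block with fewer than
-- two whitespace tokens, or a block still open at the end of the program.
def Pre_expand_macros (program : List String) : Prop := pvWF program false = true
instance (program : List String) : Decidable (Pre_expand_macros program) := by
  unfold Pre_expand_macros; infer_instance

def pvWitness_expand_macros : List String :=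
  ["DEFINE twice {", "add 1", "add 1", "}", "start twice end", "other line"]

def Spec_expand_macros (program : List String) (out : List String) : Prop := out = expand_macros_alt program
instance (program : List String) (out : List String) : Decidable (Spec_expand_macros program out) := by unfold Spec_expand_macros; infer_instance

-- ===== CLAIM (what is proved, stated in full; the proofs are below) =====
def Claim_equal_expand_macros : Prop := ∀ (program : List String), Dom_expand_macros program → Pre_expand_macros program → Spec_expand_macros program (expand_macros program)

-- ===== LEMMAS AND PROOFS =====

lemma pv_len_pos (t : String) : (0 < PySem.Str.len t) ↔ t ≠ "" := by
  unfold PySem.Str.len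
  rw [Int.natCast_pos, List.length_pos_iff]
  constructor
  · intro h he; subst he; simp at h
  · intro h hn; exact h (String.toList_eq_nil_iff.mp hn)

lemma pv_append_eq (m : PVMacros) (nm fl : String) :
    pvAppendA m nm fl
      = (if PySem.Str.strip fl ≠ "" then m.modify nm [] (· ++ [fl]) else m) := by
  unfold pvAppendA
  simp only [pv_len_pos]

lemma pv_getElem1 (l : List String) (h : 2 ≤ l.length) : l[1]? = some (l.getD 1 "") := by
  rcases l with _ | ⟨a, _ | ⟨b, t⟩⟩ <;> simp_all

lemma pv_parse_eq : ∀ (rest : List String) (inside : Bool) (name : String)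
    (macros : PVMacros) (acc : List String), pvWF rest inside = true →
    pvParseA rest (if inside then some (some name) else none) macros acc
      = some (((rest.foldl pvStepB (inside, name, macros, acc)).2.2.1),
              ((rest.foldl pvStepB (inside, name, macros, acc)).2.2.2)) := by
  intro rest
  induction rest with
  | nil =>
    intro inside name macros acc hwf
    cases inside
    · simp [pvParseA]
    · simp [pvWF] at hwf
  | cons line rest ih =>
    intro inside name macros acc hwf
    cases inside
    · -- outside a block
      by_cases hD : PySem.Str.startswith line "DEFINE" = true
      · rw [pvWF] at hwf
        rw [if_pos hD] at hwf
        simp only [Bool.and_eq_true, decide_eq_true_eq] at hwf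
        obtain ⟨⟨hbr, hlen⟩, hrest⟩ := hwf
        rw [if_neg (by simp : ¬(false = true))]
        rw [show pvParseA (line :: rest) none macros acc
            = (if PySem.Str.startswith line "DEFINE" then
                 match pvInnerA line none macros with
                 | none => none
                 | some (n', isOpen, m') =>
                   pvParseA rest (if isOpen then some n' else none) m' acc
               else pvParseA rest none macros (acc ++ [line])) from rfl]
        rw [if_pos hD]
        rw [show pvInnerA line none macros
            = some (some ((PySem.Str.split₀ line).getD 1 ""), true,
                pvAppendA macros ((PySem.Str.split₀ line).getD 1 "")
                  (((PySem.Str.split? line "{").getD []).getD 1 "")) from by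
          unfold pvInnerA
          rw [if_pos hbr, pv_getElem1 _ hlen]]
        rw [List.foldl_cons]
        rw [show pvStepB (false, name, macros, acc) line
            = (true, (PySem.Str.split₀ line).getD 1 "",
               pvAppendA macros ((PySem.Str.split₀ line).getD 1 "")
                 (((PySem.Str.split? line "{").getD []).getD 1 ""), acc) from by
          unfold pvStepB
          dsimp only
          rw [pv_append_eq]
          simp only [Bool.false_or]
          rw [if_pos hD, if_pos hbr]
          dsimp only
          split <;> rfl]
        have := ih true ((PySem.Str.split₀ line).getD 1 "")
          (pvAppendA macros ((PySem.Str.split₀ line).getD 1 "")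
            (((PySem.Str.split? line "{").getD []).getD 1 "")) acc hrest
        simpa using this
      · rw [pvWF] at hwf
        rw [if_neg hD] at hwf
        rw [if_neg (by simp : ¬(false = true))]
        rw [show pvParseA (line :: rest) none macros acc
            = (if PySem.Str.startswith line "DEFINE" then
                 match pvInnerA line none macros with
                 | none => none
                 | some (n', isOpen, m') =>
                   pvParseA rest (if isOpen then some n' else none) m' acc
               else pvParseA rest none macros (acc ++ [line])) from rfl]
        rw [if_neg hD]
        rw [List.foldl_cons]
        rw [show pvStepB (false, name, macros, acc) line = (false, name, macros, acc ++ [line]) from by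
          unfold pvStepB
          dsimp only
          simp only [Bool.false_or]
          rw [if_neg hD]]
        have := ih false name macros (acc ++ [line]) hwf
        simpa using this
    · -- inside a block
      rw [if_pos rfl]
      rw [show pvParseA (line :: rest) (some (some name)) macros acc
          = (match pvInnerA line (some name) macros with
             | none => none
             | some (n', isOpen, m') =>
               pvParseA rest (if isOpen then some n' else none) m' acc) from rfl]
      rw [List.foldl_cons]
      rw [pvWF] at hwf
      by_cases hbr : PySem.Str.isIn "{" line = true
      · rw [if_pos hbr] at hwf
        simp only [Bool.and_eq_true, decide_eq_true_eq] at hwf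
        obtain ⟨hlen, hrest⟩ := hwf
        rw [show pvInnerA line (some name) macros
            = some (some ((PySem.Str.split₀ line).getD 1 ""), true,
                pvAppendA macros ((PySem.Str.split₀ line).getD 1 "")
                  (((PySem.Str.split? line "{").getD []).getD 1 "")) from by
          unfold pvInnerA
          rw [if_pos hbr, pv_getElem1 _ hlen]]
        rw [show pvStepB (true, name, macros, acc) line
            = (true, (PySem.Str.split₀ line).getD 1 "",
               pvAppendA macros ((PySem.Str.split₀ line).getD 1 "")
                 (((PySem.Str.split? line "{").getD []).getD 1 ""), acc) from by
          unfold pvStepB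
          dsimp only
          rw [pv_append_eq]
          simp only [Bool.true_or, if_true]
          rw [if_pos hbr]
          dsimp only
          split <;> rfl]
        have := ih true ((PySem.Str.split₀ line).getD 1 "")
          (pvAppendA macros ((PySem.Str.split₀ line).getD 1 "")
            (((PySem.Str.split? line "{").getD []).getD 1 "")) acc hrest
        simpa using this
      · rw [if_neg hbr] at hwf
        by_cases hcl : PySem.Str.isIn "}" line = true
        · rw [if_pos hcl] at hwf
          rw [show pvInnerA line (some name) macros
              = some (some name, false,
                  pvAppendA macros name (((PySem.Str.split? line "}").getD []).getD 0 "")) from by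
            unfold pvInnerA
            rw [if_neg hbr, if_pos hcl]]
          rw [show pvStepB (true, name, macros, acc) line
              = (false, name,
                 pvAppendA macros name (((PySem.Str.split? line "}").getD []).getD 0 ""), acc) from by
            unfold pvStepB
            dsimp only
            rw [pv_append_eq]
            simp only [Bool.true_or, if_true]
            rw [if_neg hbr, if_pos hcl]
            dsimp only
            split <;> rfl]
          have := ih false name
            (pvAppendA macros name (((PySem.Str.split? line "}").getD []).getD 0 "")) acc hwf
          simpa using this
        · rw [if_neg hcl] at hwf
          rw [show pvInnerA line (some name) macros
              = some (some name, true, pvAppendA macros name line) from by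
            unfold pvInnerA
            rw [if_neg hbr, if_neg hcl]]
          rw [show pvStepB (true, name, macros, acc) line
              = (true, name, pvAppendA macros name line, acc) from by
            unfold pvStepB
            dsimp only
            rw [pv_append_eq]
            simp only [Bool.true_or, if_true]
            rw [if_neg hbr, if_neg hcl]
            dsimp only
            split <;> rfl]
          have := ih true name (pvAppendA macros name line) acc hwf
          simpa using this

lemma pv_nodup_modify (d : PVMacros) (k : String) (f : List String → List String)
    (h : d.keys.Nodup) : (d.modify k [] f).keys.Nodup := by
  have h2 := PySem.Dict.keys_foldl_modify (l := [k]) (d0 := ([] : List String))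
    (f := fun _ _ v => f v) (d := d)
  simp only [List.foldl_cons, List.foldl_nil] at h2
  rw [h2]
  exact PySem.Set.nodup_update d.keys [k] h

lemma pv_nodup_step (st : Bool × String × PVMacros × List String) (line : String)
    (h : st.2.2.1.keys.Nodup) : (pvStepB st line).2.2.1.keys.Nodup := by
  obtain ⟨i, n, m, p⟩ := st
  unfold pvStepB
  dsimp only
  split_ifs <;> first | exact h | exact pv_nodup_modify _ _ _ h

lemma pv_nodup_foldl : ∀ (rest : List String) (st : Bool × String × PVMacros × List String),
    st.2.2.1.keys.Nodup → ((rest.foldl pvStepB st).2.2.1).keys.Nodup := by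
  intro rest
  induction rest with
  | nil => intro st h; exact h
  | cons line rest ih => intro st h; exact ih _ (pv_nodup_step st line h)

lemma pv_enum_cons (x : String) (xs : List String) (s : Int) :
    PySem.List.enumerate (x :: xs) s = (s, x) :: PySem.List.enumerate xs (s + 1) := by
  simp [PySem.List.enumerate]

lemma pv_enum_map_snd : ∀ (l : List String) (s : Int),
    (PySem.List.enumerate l s).map (fun p => p.2) = l := by
  intro l
  induction l with
  | nil => intro s; simp [PySem.List.enumerate]
  | cons x xs ih => intro s; rw [pv_enum_cons]; simp [ih]

lemma pv_find_enum : ∀ (l : List String) (s : Int) (t : String) (j : Int), l.Nodup →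
    ((((PySem.List.enumerate l s).map (fun p => (p.2, p.1))).find?
        (fun q => q.1 == t)).map (·.2) = some j
      ↔ ∃ n : Nat, j = s + n ∧ l[n]? = some t) := by
  intro l
  induction l with
  | nil => intro s t j _; simp [PySem.List.enumerate]
  | cons x xs ih =>
    intro s t j hnd
    rw [pv_enum_cons]
    simp only [List.map_cons, List.find?_cons]
    by_cases hx : x = t
    · subst hx
      simp only [BEq.rfl, Option.map_some]
      constructor
      · intro h
        simp only [Option.some.injEq] at h
        exact ⟨0, by omega, by simp⟩
      · rintro ⟨n, hj, hn⟩
        rcases n with _ | m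
        · simp at hj ⊢; omega
        · exfalso
          have hm : x ∈ xs := List.mem_of_getElem? (by simpa using hn)
          exact (List.nodup_cons.mp hnd).1 hm
    · have hbe : ((x, s).1 == t) = false := by simpa using hx
      rw [hbe]
      rw [ih (s + 1) t j (List.nodup_cons.mp hnd).2]
      constructor
      · rintro ⟨n, hj, hn⟩
        exact ⟨n + 1, by push_cast at hj ⊢; omega, by simpa using hn⟩
      · rintro ⟨n, hj, hn⟩
        rcases n with _ | m
        · exact absurd (by simpa using hn) hx
        · exact ⟨m, by push_cast at hj ⊢; omega, by simpa using hn⟩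

lemma pv_get_enum : ∀ (l : List String) (s : Int) (t : String) (j : Int), l.Nodup →
    (((((PySem.List.enumerate l s).foldl (fun d p => d.insert p.2 p.1)
        (PySem.Dict.empty : PySem.Dict String Int))).get? t) = some j
      ↔ ∃ n : Nat, j = s + n ∧ l[n]? = some t) := by
  intro l s t j hnd
  have hitems := PySem.Dict.items_foldl_insert_fresh (l := PySem.List.enumerate l s)
    (k := fun p => p.2) (v := fun p => p.1) (d := (PySem.Dict.empty : PySem.Dict String Int))
    (by intro a _; simp [PySem.Dict.contains, PySem.Dict.empty])
    (by rw [pv_enum_map_snd]; exact hnd)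
  unfold PySem.Dict.get?
  rw [hitems]
  simp only [PySem.Dict.empty, List.nil_append]
  exact pv_find_enum l s t j hnd

lemma pv_foldA (ts : List String) : ∀ (items : List (String × List String))
    (acc : List String) (b : Bool),
    items.foldl (fun (acc : List String × Bool) kv =>
        if ts.contains kv.1 then (acc.1 ++ kv.2, true) else acc) (acc, b)
      = (acc ++ (items.filter (fun kv => ts.contains kv.1)).flatMap (·.2),
         b || !(items.filter (fun kv => ts.contains kv.1)).isEmpty) := by
  intro items
  induction items with
  | nil => intro acc b; simp
  | cons kv items ih =>
    intro acc b
    rw [List.foldl_cons]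
    by_cases hc : ts.contains kv.1 = true
    · rw [if_pos hc, ih, List.filter_cons, if_pos hc]
      simp only [List.flatMap_cons, List.append_assoc, List.isEmpty_cons,
        Bool.not_false, Bool.or_true, Bool.true_or]
    · rw [if_neg hc, ih, List.filter_cons, if_neg hc]

lemma pv_slots_eq (macros : PVMacros) (h : macros.keys.Nodup) (line : String) :
    PySem.List.sorted
      (PySem.Set.ofList ((PySem.Str.split₀ line).filterMap (fun t =>
        (((PySem.List.enumerate macros.keys).foldl (fun d p => d.insert p.2 p.1)
          (PySem.Dict.empty : PySem.Dict String Int))).get? t))) id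
    = (macros.items.zipIdx.filter
        (fun q => (PySem.Str.split₀ line).contains q.1.1)).map (fun q => ((q.2 : Int))) := by
  set ts := PySem.Str.split₀ line with hts
  set J := (macros.items.zipIdx.filter (fun q => ts.contains q.1.1)).map (fun q => ((q.2 : Int))) with hJ
  have hpw : J.Pairwise (fun a b => a < b) := by
    rw [hJ, List.pairwise_map]
    have h0 : macros.items.zipIdx.Pairwise (fun a b => a.2 < b.2) := by
      have h1 := List.pairwise_lt_range' (s := 0) (n := macros.items.length) 1
      rw [← List.zipIdx_map_snd 0 macros.items] at h1
      exact (List.pairwise_map).mp h1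
    exact (h0.sublist (List.filter_sublist)).imp (by intro a b hab; exact_mod_cast hab)
  have hnodJ : J.Nodup := hpw.imp (fun hab => ne_of_lt hab)
  apply PySem.List.sorted_eq_of_perm_of_pairwise_lt
  · rw [List.perm_ext_iff_of_nodup hnodJ (PySem.Set.nodup_ofList _)]
    intro j
    rw [PySem.Set.mem_ofList, List.mem_filterMap]
    constructor
    · intro hj
      rw [hJ] at hj
      rcases List.mem_map.mp hj with ⟨q, hqf, hqe⟩
      rcases List.mem_filter.mp hqf with ⟨hqz, hqc⟩
      have hq : macros.items[q.2]? = some q.1 := List.mem_zipIdx_iff_getElem?.mp hqz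
      refine ⟨q.1.1, List.contains_iff_mem.mp hqc, ?_⟩
      rw [pv_get_enum macros.keys 0 q.1.1 j h]
      refine ⟨q.2, by omega, ?_⟩
      have : macros.keys = macros.items.map (fun p => p.1) := rfl
      rw [this, List.getElem?_map, hq, Option.map_some]
    · rintro ⟨t, ht, hget⟩
      rw [pv_get_enum macros.keys 0 t j h] at hget
      rcases hget with ⟨n, hjn, hkn⟩
      have hkeys : macros.keys = macros.items.map (fun p => p.1) := rfl
      rw [hkeys, List.getElem?_map] at hkn
      rcases Option.map_eq_some_iff.mp hkn with ⟨kv, hkv, hkv1⟩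
      rw [hJ]
      refine List.mem_map.mpr ⟨(kv, n), List.mem_filter.mpr ⟨?_, ?_⟩, by simp; omega⟩
      · exact List.mem_zipIdx_iff_getElem?.mpr (by simpa using hkv)
      · simp only [hkv1]
        exact List.contains_iff_mem.mpr (hkv1 ▸ ht)
  · exact hpw

lemma pv_line_eq (macros : PVMacros) (h : macros.keys.Nodup) (acc : List String) (line : String) :
    (let r := macros.items.foldl
        (fun (a : List String × Bool) kv =>
          if (PySem.Str.split₀ line).contains kv.1 then (a.1 ++ kv.2, true) else a)
        (acc, false)
     if r.2 then r.1 else r.1 ++ [line])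
    = (let slots := PySem.List.sorted
        (PySem.Set.ofList ((PySem.Str.split₀ line).filterMap (fun t =>
          (((PySem.List.enumerate macros.keys).foldl (fun d p => d.insert p.2 p.1)
            (PySem.Dict.empty : PySem.Dict String Int))).get? t))) id
       if slots ≠ [] then
         slots.foldl (fun a s => a ++ PySem.List.pyGetD macros.values s []) acc
       else acc ++ [line]) := by
  rw [pv_foldA, pv_slots_eq macros h line]
  set ts := PySem.Str.split₀ line with hts
  have hF : (macros.items.filter (fun kv => ts.contains kv.1))
      = (macros.items.zipIdx.filter (fun q => ts.contains q.1.1)).map Prod.fst := by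
    conv_lhs => rw [← List.zipIdx_map_fst 0 macros.items]
    rw [List.filter_map]
    rfl
  set Z := macros.items.zipIdx.filter (fun q => ts.contains q.1.1) with hZ
  have hfold : (Z.map (fun q => ((q.2 : Int)))).foldl
      (fun a s => a ++ PySem.List.pyGetD macros.values s []) acc
      = acc ++ Z.flatMap (fun q => q.1.2) := by
    rw [List.foldl_map]
    rw [PySem.List.foldl_congr_mem Z _ (fun a q => a ++ q.1.2) acc ?_]
    · exact PySem.List.foldl_append_eq_flatMap _ _ _
    · intro a q hq
      have hqz := List.mem_zipIdx_iff_getElem?.mp (List.mem_of_mem_filter hq)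
      have hv : macros.values = macros.items.map (fun p => p.2) := rfl
      rw [PySem.List.pyGetD_natCast, List.getD_eq_getElem?_getD, hv,
        List.getElem?_map, hqz, Option.map_some, Option.getD_some]
  by_cases hFe : macros.items.filter (fun kv => ts.contains kv.1) = []
  · have hZe : Z = [] := by
      rw [hFe] at hF
      exact (List.map_eq_nil_iff.mp hF.symm)
    rw [hFe, hZe]
    simp
  · have hZe : Z ≠ [] := by
      intro hc
      exact hFe (by rw [hF, hc]; simp)
    rw [if_pos (by simpa using hFe), if_pos (by simpa using hZe)]
    rw [hfold, hF, List.flatMap_map]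

lemma pv_replace_eq (macros : PVMacros) (removed : List String)
    (h : macros.keys.Nodup) : pvReplaceA macros removed = pvExpandB macros removed := by
  unfold pvReplaceA pvExpandB
  apply PySem.List.foldl_congr_mem
  intro acc line _
  exact pv_line_eq macros h acc line

-- ===== VERDICT (by name: the statement is the Claim_ definition above) =====
theorem expand_macros_spec : Claim_equal_expand_macros := by
  intro program _ hpre
  unfold Spec_expand_macros expand_macros expand_macros_alt
  have hp := pv_parse_eq program false "" PySem.Dict.empty [] hpre
  simp only [Bool.false_eq_true, if_false] at hp
  rw [hp]
  exact pv_replace_eq _ _ (pv_nodup_foldl program (false, "", PySem.Dict.empty, []) (by simp [PySem.Dict.keys, PySem.Dict.empty]))
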